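-- pv_equiv track=rewrite | github.com/alfanick/borgmarks | borgmarks/cli.py | _folder_name_key
-- ===== SOURCE A (Python) =====
-- def _folder_name_key(name: str) -> str:
--     s = (name or "").strip()
--     while s and not s[0].isalnum():
--         s = s[1:].lstrip()
--     out = []
--     prev_space = False
--     for ch in s:
--         if ch.isspace():
--             if not prev_space:
--                 out.append(" ")
--             prev_space = True
--             continue
--         prev_space = False
--         out.append(ch.lower())
--     return "".join(out).strip()
-- ===== SOURCE B (Python) =====
-- def _folder_name_key(name: str) -> str:
--     s = (name or "").strip()
--     i = next((j for j, ch in enumerate(s) if ch.isalnum()), len(s))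
--     return " ".join(s[i:].split()).lower()
-- ===== Notes on version B (the rewrite author's own statement) =====
-- stated objective: faster
-- what changed: Replaces the repeated s[1:].lstrip() peeling loop and the manual prev_space character loop with one index scan to the first alphanumeric character followed by split()/join()/lower(), making the whole function a single linear pass.
import Mathlib
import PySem

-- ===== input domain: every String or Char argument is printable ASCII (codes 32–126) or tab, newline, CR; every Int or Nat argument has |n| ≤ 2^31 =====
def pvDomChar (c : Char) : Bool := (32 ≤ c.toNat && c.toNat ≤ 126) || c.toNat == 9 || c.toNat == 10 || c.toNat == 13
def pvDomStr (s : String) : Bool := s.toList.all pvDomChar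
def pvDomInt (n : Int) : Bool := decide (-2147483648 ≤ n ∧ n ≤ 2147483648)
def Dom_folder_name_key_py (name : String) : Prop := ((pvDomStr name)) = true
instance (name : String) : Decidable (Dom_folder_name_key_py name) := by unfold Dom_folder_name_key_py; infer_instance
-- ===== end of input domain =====

-- B replaces A's repeated s[1:].lstrip() prefix-peeling loop and the manual prev_space
-- state machine by one scan to the first alphanumeric character plus split/join/lower.

-- ===== PORT A =====
def folderWhileA : List Char → List Char
  | [] => []
  | c :: rest =>
    if PySem.Chars.isalnum c then c :: rest
    else folderWhileA (PySem.Chars.lstrip rest)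
termination_by s => s.length
decreasing_by
  simp only [PySem.Chars.lstrip, List.length_cons]
  exact Nat.lt_succ_of_le (List.length_dropWhile_le _ _)

def folderStepA (acc : List Char × Bool) (ch : Char) : List Char × Bool :=
  if PySem.Chars.isspace ch then
    (if acc.2 then acc.1 else acc.1 ++ [' '], true)
  else (acc.1 ++ [PySem.Chars.lowerChar ch], false)

def folder_name_key_py (name : String) : String :=
  let s := folderWhileA (PySem.Chars.strip name.toList)
  let res := s.foldl folderStepA ([], false)
  String.mk (PySem.Chars.strip res.1)

-- ===== PORT B =====
def folder_name_key_py_alt (name : String) : String :=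
  let s := PySem.Chars.strip name.toList
  let t := s.dropWhile (fun c => !PySem.Chars.isalnum c)
  String.mk (PySem.Chars.lower (PySem.Chars.join [' '] (PySem.Chars.split₀ t)))


-- ===== PRECONDITION & SPEC =====
def Spec_folder_name_key_py (name : String) (out : String) : Prop := out = folder_name_key_py_alt name
instance (name : String) (out : String) : Decidable (Spec_folder_name_key_py name out) := by unfold Spec_folder_name_key_py; infer_instance

-- ===== CLAIM (what is proved, stated in full; the proofs are below) =====
def Claim_equal_folder_name_key_py : Prop := ∀ (name : String), Dom_folder_name_key_py name → Spec_folder_name_key_py name (folder_name_key_py name)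

-- ===== LEMMAS AND PROOFS =====
def pvWords : List Char → List (List Char)
  | [] => []
  | c :: rest =>
    if PySem.Chars.isspace c then pvWords rest
    else (c :: rest.takeWhile (fun d => !PySem.Chars.isspace d)) ::
         pvWords (rest.dropWhile (fun d => !PySem.Chars.isspace d))
termination_by s => s.length
decreasing_by
  · simp only [List.length_cons]; omega
  · simp only [List.length_cons]
    exact Nat.lt_succ_of_le (List.length_dropWhile_le _ _)

theorem pv_ws_not_alnum (c : Char) (h : PySem.Chars.isspace c = true) :
    PySem.Chars.isalnum c = false := by
  have hA : ('A').val.toNat = 65 := rfl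
  have hZ : ('Z').val.toNat = 90 := rfl
  have ha : ('a').val.toNat = 97 := rfl
  have hz : ('z').val.toNat = 122 := rfl
  have h0 : ('0').val.toNat = 48 := rfl
  have h9 : ('9').val.toNat = 57 := rfl
  simp only [PySem.Chars.isspace, PySem.Chars.isalnum, PySem.Chars.isalpha, PySem.Chars.isdigit,
    PySem.Chars.isupper, PySem.Chars.islower, Bool.or_eq_true, Bool.and_eq_true,
    Bool.or_eq_false_iff, Bool.and_eq_false_iff, decide_eq_true_eq, decide_eq_false_iff_not,
    not_le, Char.le_def, UInt32.le_iff_toNat_le, Char.toNat, hA, hZ, ha, hz, h0, h9] at *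
  omega

theorem pv_alnum_not_ws (c : Char) (h : PySem.Chars.isalnum c = true) :
    PySem.Chars.isspace c = false := by
  by_contra hc
  have := pv_ws_not_alnum c (by revert hc; cases PySem.Chars.isspace c <;> simp)
  simp [this] at h

theorem pv_ws_lowerChar (c : Char) (h : PySem.Chars.isspace c = false) :
    PySem.Chars.isspace (PySem.Chars.lowerChar c) = false := by
  unfold PySem.Chars.lowerChar
  split
  · rename_i hu
    simp only [PySem.Chars.isupper, Bool.and_eq_true, decide_eq_true_eq, Char.le_def,
      UInt32.le_iff_toNat_le] at hu
    have hA : ('A').val.toNat = 65 := rfl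
    have hZ : ('Z').val.toNat = 90 := rfl
    rw [hA] at hu; rw [hZ] at hu
    have hv : (c.toNat + 32).isValidChar := by
      constructor
      · show c.toNat + 32 < 0xd800
        unfold Char.toNat at *
        omega
    have ht : (Char.ofNat (c.toNat + 32)).toNat = c.toNat + 32 := by
      rw [Char.toNat_ofNat]; simp [hv]
    simp only [PySem.Chars.isspace, ht, Bool.or_eq_false_iff, Bool.and_eq_false_iff,
      decide_eq_false_iff_not]
    unfold Char.toNat at *
    omega
  · exact h

-- while loop = dropWhile
theorem pv_dropWhile_lstrip (x : List Char) :
    List.dropWhile (fun c => !PySem.Chars.isalnum c) (PySem.Chars.lstrip x)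
      = List.dropWhile (fun c => !PySem.Chars.isalnum c) x := by
  induction x with
  | nil => rfl
  | cons c rest ih =>
    by_cases hws : PySem.Chars.isspace c = true
    · simp [PySem.Chars.lstrip, List.dropWhile_cons, hws, pv_ws_not_alnum c hws] at *
      exact ih
    · simp at hws
      simp [PySem.Chars.lstrip, List.dropWhile_cons, hws]

theorem pv_whileA (s : List Char) :
    folderWhileA s = s.dropWhile (fun c => !PySem.Chars.isalnum c) := by
  fun_induction folderWhileA s with
  | case1 => rfl
  | case2 c rest h => simp [h]
  | case3 c rest h ih =>
    simp only [List.dropWhile_cons]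
    simp only [h, Bool.not_false, if_true]
    rw [ih, pv_dropWhile_lstrip]

-- split₀ = pvWords
theorem pv_split_go (s : List Char) : ∀ (cur : List Char) (acc : List (List Char)),
    PySem.Chars.split₀.go s cur acc =
      acc.reverse ++ (if cur.isEmpty then pvWords s
        else (cur.reverse ++ s.takeWhile (fun d => !PySem.Chars.isspace d)) ::
             pvWords (s.dropWhile (fun d => !PySem.Chars.isspace d))) := by
  induction s with
  | nil =>
    intro cur acc
    cases cur <;> simp [PySem.Chars.split₀.go, pvWords]
  | cons c rest ih =>
    intro cur acc
    by_cases hws : PySem.Chars.isspace c = true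
    · rw [PySem.Chars.split₀.go]
      simp only [hws, if_true]
      cases cur with
      | nil => simp [ih, pvWords, hws]
      | cons d ds => simp [ih, pvWords, hws]
    · simp at hws
      rw [PySem.Chars.split₀.go]
      simp only [hws, Bool.false_eq_true, if_false]
      rw [ih]
      cases cur with
      | nil => simp [pvWords, hws, List.takeWhile_cons, List.dropWhile_cons]
      | cons d ds => simp [pvWords, hws, List.takeWhile_cons, List.dropWhile_cons]

theorem pv_split₀_eq_words (s : List Char) : PySem.Chars.split₀ s = pvWords s := by
  rw [PySem.Chars.split₀, pv_split_go]
  simp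

-- the loop's output grows by appending: pull the accumulated prefix out
theorem pv_step_out (out : List Char) (ps : Bool) (c : Char) :
    folderStepA (out, ps) c =
      (out ++ (folderStepA ([], ps) c).1, (folderStepA ([], ps) c).2) := by
  unfold folderStepA
  cases ps <;> by_cases h : PySem.Chars.isspace c = true <;> simp [h]

theorem pv_foldl_out (s : List Char) : ∀ (out : List Char) (ps : Bool),
    s.foldl folderStepA (out, ps) =
      (out ++ (s.foldl folderStepA ([], ps)).1, (s.foldl folderStepA ([], ps)).2) := by
  induction s with
  | nil => intro out ps; simp
  | cons c rest ih =>
    intro out ps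
    simp only [List.foldl_cons]
    rw [pv_step_out out ps c]
    rw [ih (out ++ (folderStepA ([], ps) c).1) (folderStepA ([], ps) c).2]
    conv_rhs => rw [← Prod.mk.eta (p := folderStepA ([], ps) c)]
    rw [ih (folderStepA ([], ps) c).1 (folderStepA ([], ps) c).2]
    simp

-- rstrip facts
theorem pv_rstrip_append (a b : List Char) :
    PySem.Chars.rstrip (a ++ b) =
      if PySem.Chars.rstrip b = [] then PySem.Chars.rstrip a else a ++ PySem.Chars.rstrip b := by
  simp only [PySem.Chars.rstrip, List.reverse_append, List.dropWhile_append]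
  by_cases h : (List.dropWhile PySem.Chars.isspace b.reverse).isEmpty = true
  · simp only [h, if_true]
    simp only [List.isEmpty_iff] at h
    simp [h]
  · simp only [h, if_false]
    simp only [List.isEmpty_iff] at h
    simp [h]

theorem pv_rstrip_all_ns (xs : List Char) (h : ∀ c ∈ xs, PySem.Chars.isspace c = false) :
    PySem.Chars.rstrip xs = xs := by
  simp only [PySem.Chars.rstrip]
  rw [List.dropWhile_eq_self_iff.mpr]
  · simp
  · intro hne
    have hm : xs.reverse[0] ∈ xs := by
      have h0 : xs.reverse[0] ∈ xs.reverse := List.getElem_mem hne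
      simpa using h0
    simp only [h _ hm]
    simp

theorem pv_lowerChar_space : PySem.Chars.lowerChar ' ' = ' ' := by decide

theorem pv_join_cons (sep a : List Char) (l : List (List Char)) :
    PySem.Chars.join sep (a :: l) =
      if l = [] then a else a ++ sep ++ PySem.Chars.join sep l := by
  cases l <;> simp [PySem.Chars.join, List.intercalate, List.intersperse]

theorem pv_words_ne_nil (s : List Char) : ∀ w ∈ pvWords s, w ≠ [] := by
  fun_induction pvWords s with
  | case1 => simp
  | case2 c rest h ih => simpa [pvWords, h] using ih
  | case3 c rest h ih =>
    intro w hw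
    rw [pvWords.eq_def] at hw
    simp only [h, Bool.false_eq_true, if_false, List.mem_cons] at hw
    rcases hw with hw | hw
    · simp [hw]
    · exact ih w (by rw [pvWords.eq_def]; exact hw)

theorem pv_lower_join_eq_nil_iff (s : List Char) :
    PySem.Chars.lower (PySem.Chars.join [' '] (pvWords s)) = [] ↔ pvWords s = [] := by
  cases hpw : pvWords s with
  | nil => simp [PySem.Chars.join, List.intercalate, PySem.Chars.lower]
  | cons a l =>
    have ha : a ≠ [] := pv_words_ne_nil s a (by rw [hpw]; exact List.mem_cons_self)
    rw [pv_join_cons]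
    constructor
    · intro h
      exfalso
      apply ha
      cases hl : l with
      | nil =>
        rw [hl] at h
        simpa [PySem.Chars.lower] using h
      | cons b l' =>
        rw [hl] at h
        simp [PySem.Chars.lower] at h
    · intro h; exact absurd h (by simp)

theorem pv_dropWhile_head {q : Char → Bool} (x : List Char) (c : Char) (r : List Char)
    (h : x.dropWhile q = c :: r) : q c = false := by
  induction x with
  | nil => simp at h
  | cons d ds ih =>
    by_cases hq : q d = true
    · rw [List.dropWhile_cons, if_pos hq] at h; exact ih h
    · rw [List.dropWhile_cons, if_neg hq] at h
      simp at hq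
      cases h; exact hq

theorem pv_F1 (w : List Char) : ∀ (r : List Char), (∀ c ∈ w, PySem.Chars.isspace c = false) →
    ((w ++ r).foldl folderStepA ([], false)).1 =
      PySem.Chars.lower w ++ (r.foldl folderStepA ([], false)).1 := by
  induction w with
  | nil => intro r _; simp [PySem.Chars.lower]
  | cons c w' ih =>
    intro r hns
    have hc : PySem.Chars.isspace c = false := hns c List.mem_cons_self
    simp only [List.cons_append, List.foldl_cons, folderStepA, hc, Bool.false_eq_true, if_false]
    rw [pv_foldl_out]
    simp only [List.nil_append]
    rw [ih r (fun d hd => hns d (List.mem_cons_of_mem _ hd))]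
    simp [PySem.Chars.lower]

theorem pv_F2 (sp : Char) (r' : List Char) (h : PySem.Chars.isspace sp = true) :
    ((sp :: r').foldl folderStepA ([], false)).1 =
      ' ' :: (r'.foldl folderStepA ([], true)).1 := by
  simp only [List.foldl_cons, folderStepA, h, if_true]
  rw [pv_foldl_out]
  simp

theorem pv_skip_ws (c : Char) (rest : List Char) (h : PySem.Chars.isspace c = true) :
    (c :: rest).foldl folderStepA ([], true) = rest.foldl folderStepA ([], true) := by
  simp [List.foldl_cons, folderStepA, h]

theorem pv_lower_ns (w : List Char) (h : ∀ c ∈ w, PySem.Chars.isspace c = false) :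
    ∀ x ∈ PySem.Chars.lower w, PySem.Chars.isspace x = false := by
  intro x hx
  simp only [PySem.Chars.lower, List.mem_map] at hx
  obtain ⟨y, hy, rfl⟩ := hx
  exact pv_ws_lowerChar y (h y hy)

theorem pv_M1 : ∀ (n : Nat) (s : List Char), s.length ≤ n →
    PySem.Chars.rstrip ((s.foldl folderStepA ([], true)).1) =
      PySem.Chars.lower (PySem.Chars.join [' '] (pvWords s)) := by
  intro n
  induction n with
  | zero =>
    intro s hs
    have : s = [] := List.eq_nil_of_length_eq_zero (Nat.le_zero.mp hs)
    subst this
    simp [pvWords, PySem.Chars.join, List.intercalate, PySem.Chars.lower, PySem.Chars.rstrip]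
  | succ n ih =>
    intro s hs
    cases s with
    | nil => simp [pvWords, PySem.Chars.join, List.intercalate, PySem.Chars.lower, PySem.Chars.rstrip]
    | cons c rest =>
      by_cases hws : PySem.Chars.isspace c = true
      · rw [pv_skip_ws c rest hws]
        rw [ih rest (by simpa using Nat.lt_succ_iff.mp (by simpa using hs))]
        rw [pvWords]
        simp [hws]
      · simp at hws
        -- first word
        set w := rest.takeWhile (fun d => !PySem.Chars.isspace d) with hw
        set r := rest.dropWhile (fun d => !PySem.Chars.isspace d) with hr
        have hrest : w ++ r = rest := List.takeWhile_append_dropWhile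
        have hwns : ∀ d ∈ w, PySem.Chars.isspace d = false := by
          intro d hd
          have := List.mem_takeWhile_imp hd
          simpa using this
        have hlhs : ((c :: rest).foldl folderStepA ([], true)).1 =
            PySem.Chars.lowerChar c :: (PySem.Chars.lower w ++ (r.foldl folderStepA ([], false)).1) := by
          simp only [List.foldl_cons, folderStepA, hws, Bool.false_eq_true, if_false]
          rw [pv_foldl_out]
          simp only [List.nil_append]
          rw [← hrest, pv_F1 w r hwns]
          simp
        have hwords : pvWords (c :: rest) = (c :: w) :: pvWords r := by
          rw [pvWords]; simp [hws, ← hw, ← hr]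
        cases hrc : r with
        | nil =>
          rw [hlhs, hrc]
          simp only [List.foldl_nil, List.append_nil]
          rw [pv_rstrip_all_ns _ (by
            intro x hx
            rcases List.mem_cons.mp hx with hx | hx
            · subst hx; exact pv_ws_lowerChar c hws
            · exact pv_lower_ns w hwns x hx)]
          rw [hwords, hrc, pvWords, pv_join_cons]
          simp [PySem.Chars.lower]
        | cons sp r' =>
          have hsp : PySem.Chars.isspace sp = true := by
            have h2 : (fun d => !PySem.Chars.isspace d) sp = false :=
              pv_dropWhile_head rest sp r' (by rw [← hr, hrc])
            simpa using h2
          have hr'len : r'.length ≤ n := by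
            have h1 : r.length ≤ rest.length := by rw [hr]; exact List.length_dropWhile_le _ _
            have : r'.length < rest.length := by rw [hrc] at h1; simp at h1; omega
            have hrest_le : rest.length ≤ n := by simpa using Nat.lt_succ_iff.mp (by simpa using hs)
            omega
          rw [hlhs, hrc, pv_F2 sp r' hsp]
          have hshape : PySem.Chars.lowerChar c :: (PySem.Chars.lower w ++ ' ' :: (r'.foldl folderStepA ([], true)).1)
              = ((PySem.Chars.lowerChar c :: PySem.Chars.lower w) ++ [' ']) ++ (r'.foldl folderStepA ([], true)).1 := by
            simp
          rw [hshape, pv_rstrip_append]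
          rw [ih r' hr'len]
          have hwr : pvWords r = pvWords r' := by rw [hrc, pvWords]; simp [hsp]
          by_cases hpw : pvWords r' = []
          · rw [if_pos (by rw [pv_lower_join_eq_nil_iff]; exact hpw)]
            rw [pv_rstrip_append]
            rw [if_pos (by decide)]
            rw [pv_rstrip_all_ns _ (by
              intro x hx
              rcases List.mem_cons.mp hx with hx | hx
              · subst hx; exact pv_ws_lowerChar c hws
              · exact pv_lower_ns w hwns x hx)]
            rw [hwords, hwr, hpw, pv_join_cons]
            simp [PySem.Chars.lower]
          · rw [if_neg (by rw [pv_lower_join_eq_nil_iff]; exact hpw)]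
            rw [hwords, hwr, pv_join_cons, if_neg hpw]
            simp [PySem.Chars.lower, pv_lowerChar_space]

-- ===== VERDICT =====
theorem folder_name_key_py_spec : Claim_equal_folder_name_key_py := by
  unfold Claim_equal_folder_name_key_py Spec_folder_name_key_py
  intro name _
  unfold folder_name_key_py folder_name_key_py_alt
  dsimp only
  rw [pv_whileA]
  rw [pv_split₀_eq_words]
  cases ht : (PySem.Chars.strip name.toList).dropWhile (fun c => !PySem.Chars.isalnum c) with
  | nil =>
    simp [pvWords, PySem.Chars.join, List.intercalate, PySem.Chars.lower,
      PySem.Chars.strip, PySem.Chars.lstrip, PySem.Chars.rstrip]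
  | cons c rest =>
    have hcal : PySem.Chars.isalnum c = true := by
      have := pv_dropWhile_head (q := fun d => !PySem.Chars.isalnum d) _ c rest ht
      simpa using this
    have hcws : PySem.Chars.isspace c = false := pv_alnum_not_ws c hcal
    have hstate : (c :: rest).foldl folderStepA ([], false)
        = (c :: rest).foldl folderStepA ([], true) := by
      simp [List.foldl_cons, folderStepA, hcws]
    rw [hstate]
    have hhead : ((c :: rest).foldl folderStepA ([], true)).1
        = PySem.Chars.lowerChar c :: (rest.foldl folderStepA ([], false)).1 := by
      simp only [List.foldl_cons, folderStepA, hcws, Bool.false_eq_true, if_false]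
      rw [pv_foldl_out]
      simp
    have hlstrip : PySem.Chars.lstrip (((c :: rest).foldl folderStepA ([], true)).1)
        = ((c :: rest).foldl folderStepA ([], true)).1 := by
      rw [hhead]
      simp [PySem.Chars.lstrip, List.dropWhile_cons, pv_ws_lowerChar c hcws]
    rw [PySem.Chars.strip, hlstrip]
    rw [pv_M1 (c :: rest).length (c :: rest) le_rfl]
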